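-- pv_equiv track=rewrite | github.com/yaranasserr/Low-Level-Design | MINIMUM NUMBER OF KEYPRESSES/sol.py | minimum_keypresses
-- ===== SOURCE A (Python) =====
-- from collections import Counter
--
-- def minimum_keypresses(s):
--     # Count the frequency of each character
--     freq = Counter(s)
--
--     # Sort characters by frequency in descending order
--     sorted_freq = sorted(freq.values(), reverse=True)
--
--     # Calculate the minimum number of keypresses
--     count = 0
--     for index, frequency in enumerate(sorted_freq):
--         if index < 9:
--             count += frequency * 1
--         elif index < 18:
--             count += frequency * 2
--         else:
--             count += frequency * 3
--
--     return count
-- ===== SOURCE B (Python) =====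
-- from collections import Counter
--
-- def minimum_keypresses(s):
--     if not s:
--         return 0
--     freq = Counter(s)
--     hist = Counter(freq.values())        # frequency value -> number of characters having it
--     total = 3 * len(s)                   # as if every character cost 3 presses
--     rank = 0
--     for v in range(max(freq.values()), 0, -1):   # counting-style walk over frequency values
--         m = hist.get(v, 0)
--         a = min(m, max(0, 9 - rank))     # characters of this frequency landing in ranks 0..8 (save 2v each)
--         b = min(m, max(0, 18 - rank))    # ... landing in ranks 0..17 (save a further v each)
--         total -= v * (a + b)
--         rank += m
--     return total
-- ===== Notes on version B (the rewrite author's own statement) =====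
-- stated objective: alternative
-- what changed: Replaced sort-the-frequencies-then-weight-by-rank by a counting-style algorithm: build a histogram of frequency values (Counter of Counter values), start from 3*len(s) and walk frequency values downward once, subtracting the savings for characters whose rank falls below 9 or 18 - no comparison sort and no per-rank enumerate loop.
import Mathlib
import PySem

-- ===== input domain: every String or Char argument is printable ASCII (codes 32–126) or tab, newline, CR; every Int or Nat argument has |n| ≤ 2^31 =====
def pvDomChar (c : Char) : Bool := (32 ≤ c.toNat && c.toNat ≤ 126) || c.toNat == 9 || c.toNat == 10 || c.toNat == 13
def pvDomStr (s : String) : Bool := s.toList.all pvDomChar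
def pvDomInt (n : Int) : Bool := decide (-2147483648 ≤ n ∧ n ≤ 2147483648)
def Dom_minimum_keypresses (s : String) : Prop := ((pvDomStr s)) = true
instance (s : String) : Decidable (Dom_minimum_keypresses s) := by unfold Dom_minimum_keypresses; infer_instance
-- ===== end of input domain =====

-- B replaces A's sort-then-weight-by-rank by a counting-style walk over a histogram of
-- frequency values (no comparison sort, no per-rank loop); same results, similar cost.

-- ===== PORT A =====
def minimum_keypresses (s : String) : Int :=
  let freq := PySem.Dict.counter s.toList
  let sorted_freq := PySem.List.sorted freq.values (fun v => v) true
  (PySem.List.enumerate sorted_freq 0).foldl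
    (fun count p =>
      if p.1 < 9 then count + p.2 * 1
      else if p.1 < 18 then count + p.2 * 2
      else count + p.2 * 3) 0

-- ===== PORT B =====
def minimum_keypresses_alt (s : String) : Int :=
  if s.toList.isEmpty then 0 else
  let freq := PySem.Dict.counter s.toList
  let hist := PySem.Dict.counter freq.values
  -- max(freq.values()): freq is nonempty here, so max? is some; .getD 0 only totalizes
  let mx := (PySem.List.max? freq.values (fun v => v)).getD 0
  let st := (PySem.List.pyRange mx 0 (-1)).foldl
    (fun (st : Int × Int) v =>
      let m := hist.getD v 0
      let a := min m (max 0 (9 - st.2))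
      let b := min m (max 0 (18 - st.2))
      (st.1 - v * (a + b), st.2 + m))
    (3 * (s.toList.length : Int), 0)
  st.1

-- ===== PRECONDITION & SPEC =====
def Spec_minimum_keypresses (s : String) (out : Int) : Prop := out = minimum_keypresses_alt s
instance (s : String) (out : Int) : Decidable (Spec_minimum_keypresses s out) := by unfold Spec_minimum_keypresses; infer_instance

-- ===== CLAIM =====
def Claim_equal_minimum_keypresses : Prop := ∀ (s : String), Dom_minimum_keypresses s → Spec_minimum_keypresses s (minimum_keypresses s)

-- ===== LEMMAS AND PROOFS =====

-- A's loop over enumerate starting at index i equals acc + sum + sum(drop (9-i)) + sum(drop (18-i)).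
lemma keypress_loop (l : List Int) (i : Nat) (acc : Int) :
    (PySem.List.enumerate l (i : Int)).foldl
      (fun count p =>
        if p.1 < 9 then count + p.2 * 1
        else if p.1 < 18 then count + p.2 * 2
        else count + p.2 * 3) acc
    = acc + l.sum + (l.drop (9 - i)).sum + (l.drop (18 - i)).sum := by
  induction l generalizing i acc with
  | nil => simp [PySem.List.enumerate]
  | cons x xs ih =>
    rw [PySem.List.enumerate_cons, List.foldl_cons]
    have hcast : (i : Int) + 1 = ((i + 1 : Nat) : Int) := by push_cast; ring
    rw [hcast, ih]
    by_cases h9 : i < 9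
    · have e9 : 9 - i = (9 - (i + 1)) + 1 := by omega
      have e18 : 18 - i = (18 - (i + 1)) + 1 := by omega
      have c9 : ((i : Int) < 9) = True := by simp; omega
      rw [e9, e18]
      simp only [List.drop_succ_cons, List.sum_cons, c9, if_true]
      ring
    · have e9 : 9 - i = 0 ∧ 9 - (i + 1) = 0 := by omega
      have c9 : ¬ ((i : Int) < 9) := by omega
      rw [e9.1, e9.2]
      by_cases h18 : i < 18
      · have e18 : 18 - i = (18 - (i + 1)) + 1 := by omega
        have c18 : (i : Int) < 18 := by omega
        rw [e18]
        simp only [List.drop_succ_cons, List.drop_zero, List.sum_cons, if_neg c9, if_pos c18]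
        ring
      · have e18 : 18 - i = 0 ∧ 18 - (i + 1) = 0 := by omega
        have c18 : ¬ ((i : Int) < 18) := by omega
        rw [e18.1, e18.2]
        simp only [List.drop_zero, List.sum_cons, if_neg c9, if_neg c18]
        ring

-- total savings of the rank-walk, element by element, starting at global rank n
def saveOf : List Int → Nat → Int
  | [], _ => 0
  | x :: t, n => x * (if n < 9 then 2 else if n < 18 then 1 else 0) + saveOf t (n + 1)

lemma saveOf_eq_takes (l : List Int) (n : Nat) :
    saveOf l n = (l.take (9 - n)).sum + (l.take (18 - n)).sum := by
  induction l generalizing n with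
  | nil => simp [saveOf]
  | cons x t ih =>
    rw [saveOf, ih]
    by_cases h9 : n < 9
    · have e9 : 9 - n = (9 - (n + 1)) + 1 := by omega
      have e18 : 18 - n = (18 - (n + 1)) + 1 := by omega
      rw [e9, e18]
      simp only [List.take_succ_cons, List.sum_cons, if_pos h9]
      ring
    · have e9 : 9 - n = 0 ∧ 9 - (n + 1) = 0 := by omega
      rw [e9.1, e9.2]
      by_cases h18 : n < 18
      · have e18 : 18 - n = (18 - (n + 1)) + 1 := by omega
        rw [e18]
        simp only [List.take_succ_cons, List.take_zero, List.sum_cons, if_neg h9, if_pos h18]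
        ring
      · have e18 : 18 - n = 0 ∧ 18 - (n + 1) = 0 := by omega
        rw [e18.1, e18.2]
        simp only [List.take_zero, if_neg h9, if_neg h18]
        ring

lemma saveOf_append (l₁ l₂ : List Int) (n : Nat) :
    saveOf (l₁ ++ l₂) n = saveOf l₁ n + saveOf l₂ (n + l₁.length) := by
  induction l₁ generalizing n with
  | nil => simp [saveOf]
  | cons x t ih =>
    simp only [List.cons_append, saveOf, ih, List.length_cons]
    rw [show n + (t.length + 1) = n + 1 + t.length by omega]
    ring

lemma saveOf_replicate (k : Nat) (c : Int) (n : Nat) :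
    saveOf (List.replicate k c) n
      = c * ((min (k : Int) (max 0 (9 - (n : Int)))) + (min (k : Int) (max 0 (18 - (n : Int))))) := by
  induction k generalizing n with
  | zero => simp [saveOf]
  | succ k ih =>
    rw [List.replicate_succ, saveOf, ih (n + 1)]
    by_cases h9 : n < 9
    · rw [if_pos h9]
      have : (n : Int) < 9 := by exact_mod_cast h9
      push_cast
      rw [show max 0 (9 - ((n : Int))) = 9 - n by omega,
          show max 0 (18 - ((n : Int))) = 18 - n by omega,
          show max 0 (9 - ((n : Int) + 1)) = 9 - n - 1 by omega,
          show max 0 (18 - ((n : Int) + 1)) = 18 - n - 1 by omega]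
      rw [show min ((k : Int) + 1) (9 - n) = min (k : Int) (9 - n - 1) + 1 by omega,
          show min ((k : Int) + 1) (18 - n) = min (k : Int) (18 - n - 1) + 1 by omega]
      ring
    · by_cases h18 : n < 18
      · rw [if_neg h9, if_pos h18]
        have h9' : ¬ ((n : Int) < 9) := by exact_mod_cast h9
        have h18' : (n : Int) < 18 := by exact_mod_cast h18
        push_cast
        rw [show max 0 (9 - ((n : Int))) = 0 by omega,
            show max 0 (9 - ((n : Int) + 1)) = 0 by omega,
            show max 0 (18 - ((n : Int))) = 18 - n by omega,
            show max 0 (18 - ((n : Int) + 1)) = 18 - n - 1 by omega]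
        rw [show min ((k : Int) + 1) (18 - n) = min (k : Int) (18 - n - 1) + 1 by omega,
            show min ((k : Int) + 1) (0 : Int) = 0 by omega, show min ((k : Int)) (0 : Int) = 0 by omega]
        ring
      · rw [if_neg h9, if_neg h18]
        have h9' : ¬ ((n : Int) < 9) := by exact_mod_cast h9
        have h18' : ¬ ((n : Int) < 18) := by exact_mod_cast h18
        push_cast
        rw [show max 0 (9 - ((n : Int))) = 0 by omega,
            show max 0 (9 - ((n : Int) + 1)) = 0 by omega,
            show max 0 (18 - ((n : Int))) = 0 by omega,
            show max 0 (18 - ((n : Int) + 1)) = 0 by omega]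
        rw [show min ((k : Int) + 1) (0 : Int) = 0 by omega,
            show min ((k : Int)) (0 : Int) = 0 by omega]
        ring

-- a descending-sorted list with all elements ≤ c splits as replicate (count c) c ++ rest, rest < c
lemma desc_split_top (L : List Int) (c : Int)
    (hp : L.Pairwise (fun a b => b ≤ a)) (hle : ∀ x ∈ L, x ≤ c) :
    ∃ L₂, L = List.replicate (L.count c) c ++ L₂ ∧ (∀ x ∈ L₂, x < c) ∧
      L₂.Pairwise (fun a b => b ≤ a) := by
  induction L with
  | nil => exact ⟨[], by simp⟩
  | cons x t ih =>
    rcases List.pairwise_cons.mp hp with ⟨hx, hpt⟩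
    by_cases hxc : x = c
    · obtain ⟨L₂, h1, h2, h3⟩ := ih hpt (fun y hy => hle y (List.mem_cons_of_mem _ hy))
      refine ⟨L₂, ?_, h2, h3⟩
      subst hxc
      simp only [List.count_cons_self, List.replicate_succ, List.cons_append]
      rw [← h1]
    · refine ⟨x :: t, ?_, ?_, hp⟩
      · have : (x :: t).count c = 0 := by
          rw [List.count_eq_zero]
          intro hc
          rcases List.mem_cons.mp hc with h | h
          · exact hxc h.symm
          · have := hx c h
            have := hle x (List.mem_cons_self)
            have : x = c := le_antisymm ‹x ≤ c› ‹c ≤ x›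
            exact hxc this
        rw [this]; simp
      · intro y hy
        rcases List.mem_cons.mp hy with h | h
        · subst h; exact lt_of_le_of_ne (hle y List.mem_cons_self) hxc
        · exact lt_of_le_of_lt (hx y h) (lt_of_le_of_ne (hle x List.mem_cons_self) hxc)

-- the histogram walk: folding v = M..1 with counts cnt v = L.count v computes the total savings
lemma hist_fold (M : Nat) (L : List Int) (cnt : Int → Int)
    (hp : L.Pairwise (fun a b => b ≤ a))
    (hbd : ∀ x ∈ L, 1 ≤ x ∧ x ≤ (M : Int))
    (hcnt : ∀ v : Int, 1 ≤ v → v ≤ (M : Int) → cnt v = (L.count v : Int))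
    (t : Int) (n : Nat) :
    (PySem.List.pyRange (M : Int) 0 (-1)).foldl
      (fun (st : Int × Int) v =>
        (st.1 - v * (min (cnt v) (max 0 (9 - st.2)) + min (cnt v) (max 0 (18 - st.2))),
         st.2 + cnt v))
      (t, (n : Int))
    = (t - saveOf L n, (n : Int) + (L.length : Int)) := by
  induction M generalizing L t n with
  | zero =>
    have hL : L = [] := by
      cases L with
      | nil => rfl
      | cons x xs =>
        exfalso
        have h := hbd x List.mem_cons_self
        have h1 := h.1
        have h2 := h.2
        norm_num at h2
        omega
    subst hL
    rw [PySem.List.pyRange_neg_one_eq_nil (by norm_num)]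
    simp [saveOf]
  | succ M ih =>
    have hc : ((M + 1 : Nat) : Int) = (M : Int) + 1 := by push_cast; ring
    obtain ⟨L₂, hsplit, hless, hp₂⟩ :=
      desc_split_top L ((M + 1 : Nat) : Int) hp (fun x hx => (hbd x hx).2)
    set k : Nat := L.count ((M + 1 : Nat) : Int) with hk
    rw [PySem.List.pyRange_neg_one_cons (by exact_mod_cast Nat.succ_pos M), List.foldl_cons]
    have hcntc : cnt ((M + 1 : Nat) : Int) = (k : Int) := by
      rw [hcnt _ (by rw [hc]; omega) (le_refl _), hk]
    have hbd₂ : ∀ x ∈ L₂, 1 ≤ x ∧ x ≤ (M : Int) := by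
      intro x hx
      have h1 := (hbd x (by rw [hsplit]; exact List.mem_append_right _ hx)).1
      have h2 := hless x hx
      rw [hc] at h2
      exact ⟨h1, by omega⟩
    have hcnt₂ : ∀ v : Int, 1 ≤ v → v ≤ (M : Int) → cnt v = (L₂.count v : Int) := by
      intro v h1 h2
      have hvc : ¬ (v = ((M + 1 : Nat) : Int)) := by rw [hc]; omega
      rw [hcnt v h1 (by rw [hc]; omega), hsplit, List.count_append, List.count_replicate]
      simp only [beq_iff_eq]
      rw [if_neg (by rw [hc]; omega)]
      simp
    have ihs := ih L₂ hp₂ hbd₂ hcnt₂ (t - saveOf (List.replicate k ((M + 1 : Nat) : Int)) n) (n + k)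
    simp only [hcntc]
    rw [show ((M + 1 : Nat) : Int) - 1 = (M : Int) by rw [hc]; ring]
    rw [show t - ((M + 1 : Nat) : Int) * (min (k : Int) (max 0 (9 - (n : Int)))
          + min (k : Int) (max 0 (18 - (n : Int))))
        = t - saveOf (List.replicate k ((M + 1 : Nat) : Int)) n by rw [saveOf_replicate]]
    rw [show (n : Int) + (k : Int) = ((n + k : Nat) : Int) by push_cast; ring]
    rw [ihs]
    have hsave : saveOf L n
        = saveOf (List.replicate k ((M + 1 : Nat) : Int)) n + saveOf L₂ (n + k) := by
      rw [hsplit, saveOf_append, List.length_replicate]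
    have hlen : L.length = k + L₂.length := by rw [hsplit]; simp
    rw [Prod.mk.injEq]
    constructor
    · rw [hsave]; ring
    · rw [hlen]; push_cast; ring

-- the values of Counter(xs) are the counts of the distinct elements of xs
lemma counter_values_eq (xs : List Char) :
    (PySem.Dict.counter xs).values = (PySem.Set.ofList xs).map (fun k => (xs.count k : Int)) := by
  have h := PySem.Dict.items_counter (xs := xs)
  have : (PySem.Dict.counter xs).values = ((PySem.Dict.counter xs).items).map (·.2) := rfl
  rw [this, h, List.map_map]
  rfl

lemma counter_values_pos (xs : List Char) :
    ∀ v ∈ (PySem.Dict.counter xs).values, 1 ≤ v := by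
  intro v hv
  rw [counter_values_eq] at hv
  obtain ⟨k, hk, rfl⟩ := List.mem_map.mp hv
  have hkx : k ∈ xs := (PySem.Set.mem_ofList _ _).mp hk
  have : 1 ≤ xs.count k := List.count_pos_iff.mpr hkx
  exact_mod_cast this

lemma counter_values_sum (xs : List Char) :
    (PySem.Dict.counter xs).values.sum = (xs.length : Int) := by
  rw [counter_values_eq]
  have hperm : (PySem.Set.ofList xs).Perm xs.dedup := by
    apply (List.perm_ext_iff_of_nodup (PySem.Set.nodup_ofList xs) xs.nodup_dedup).mpr
    intro a
    rw [PySem.Set.mem_ofList, List.mem_dedup]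
  have h1 : ((PySem.Set.ofList xs).map (fun k => (xs.count k : Int))).sum
      = ((xs.dedup).map (fun k => (xs.count k : Int))).sum :=
    (hperm.map _).sum_eq
  rw [h1]
  have h2 : ((xs.dedup).map (fun k => (xs.count k : Int))).sum
      = (((xs.dedup).map (fun k => xs.count k)).sum : Nat) := by
    induction xs.dedup with
    | nil => simp
    | cons a t ih => simp [ih]
  rw [h2, List.sum_map_count_dedup_eq_length]

-- ===== VERDICT =====
theorem minimum_keypresses_spec : Claim_equal_minimum_keypresses := by
  intro s _
  unfold Spec_minimum_keypresses minimum_keypresses minimum_keypresses_alt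
  by_cases hemp : s.toList.isEmpty
  · rw [if_pos hemp]
    rw [List.isEmpty_iff] at hemp
    simp [hemp, PySem.Dict.counter, PySem.Dict.empty, PySem.Dict.values,
      PySem.List.sorted]
  · rw [if_neg hemp]
    dsimp only
    set V := (PySem.Dict.counter s.toList).values with hV
    set L := PySem.List.sorted V (fun v => v) true with hL
    -- A's side
    have hA : (PySem.List.enumerate L 0).foldl
        (fun count p => if p.1 < 9 then count + p.2 * 1
          else if p.1 < 18 then count + p.2 * 2 else count + p.2 * 3) 0
        = L.sum + (L.drop 9).sum + (L.drop 18).sum := by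
      have h0 : (0 : Int) = ((0 : Nat) : Int) := rfl
      rw [h0, keypress_loop]; norm_num
    -- B's side setup
    have hne : s.toList ≠ [] := by
      intro h; rw [List.isEmpty_iff] at hemp; exact hemp h
    have hVne : V ≠ [] := by
      rw [hV, counter_values_eq]
      intro h0
      rw [List.map_eq_nil_iff] at h0
      cases hts : s.toList with
      | nil => exact hne hts
      | cons a t =>
        have ha : a ∈ PySem.Set.ofList s.toList :=
          (PySem.Set.mem_ofList _ _).mpr (by rw [hts]; exact List.mem_cons_self)
        rw [h0] at ha
        simp at ha
    obtain ⟨mx, hmx⟩ : ∃ m, PySem.List.max? V (fun v => v) = some m := by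
      cases h : PySem.List.max? V (fun v => v) with
      | none => exact absurd ((PySem.List.max?_eq_none_iff _ _).mp h) hVne
      | some m => exact ⟨m, rfl⟩
    have hmxmem : mx ∈ V := PySem.List.max?_mem hmx
    have hmx1 : 1 ≤ mx := counter_values_pos s.toList mx hmxmem
    have hmxmax : ∀ y ∈ V, y ≤ mx := fun y hy => PySem.List.max?_isMax hmx y hy
    rw [hmx]
    -- the fold
    have hperm : L.Perm V := PySem.List.sorted_perm _ _ _
    have hpair : L.Pairwise (fun a b => b ≤ a) := PySem.List.sorted_pairwise_rev V (fun v => v)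
    have hbd : ∀ x ∈ L, 1 ≤ x ∧ x ≤ ((mx.toNat : Nat) : Int) := by
      intro x hx
      have hxv : x ∈ V := hperm.mem_iff.mp hx
      refine ⟨counter_values_pos s.toList x hxv, ?_⟩
      have := hmxmax x hxv
      omega
    have hcnt : ∀ v : Int, 1 ≤ v → v ≤ ((mx.toNat : Nat) : Int) →
        (PySem.Dict.counter V).getD v 0 = (L.count v : Int) := by
      intro v _ _
      rw [PySem.Dict.getD_counter]
      exact_mod_cast congrArg Nat.cast (hperm.count_eq v).symm
    have hmxcast : (Option.some mx).getD 0 = ((mx.toNat : Nat) : Int) := by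
      simp; omega
    rw [hmxcast]
    have hfold := hist_fold mx.toNat L ((PySem.Dict.counter V).getD · 0)
      hpair hbd hcnt (3 * (s.toList.length : Int)) 0
    simp only [Nat.cast_zero] at hfold
    rw [hfold]
    -- arithmetic finish
    have hsum : L.sum = (s.toList.length : Int) := by
      rw [hperm.sum_eq, hV, counter_values_sum]
    have hsave := saveOf_eq_takes L 0
    norm_num at hsave
    have h9 : (L.take 9).sum + (L.drop 9).sum = L.sum := by
      rw [← List.sum_append, List.take_append_drop]
    have h18 : (L.take 18).sum + (L.drop 18).sum = L.sum := by
      rw [← List.sum_append, List.take_append_drop]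
    rw [hA, hsave, ← hsum]
    omega
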